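-- pv_equiv track=rewrite | github.com/L0RD-ZER0/Advent-of-Code-2021 | src/Day-5/Problem-1.py | _range_to_points
-- ===== SOURCE A (Python) =====
-- def _range_to_points(point_1: tuple[int, int], point_2: tuple[int, int]) -> list[tuple[int, int]]:
--     if point_1[0] == point_2[0]:
--         return [ (point_1[0], i) for i in range(
--             min(point_1[1], point_2[1]),
--             max(point_1[1], point_2[1]) + 1
--             ) ]
--     elif point_1[1] == point_2[1]:
--         return [ (i, point_1[1]) for i in range(
--             min(point_1[0], point_2[0]),
--             max(point_1[0], point_2[0]) + 1
--             ) ]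
-- ===== SOURCE B (Python) =====
-- def _range_to_points(point_1: tuple[int, int], point_2: tuple[int, int]) -> list[tuple[int, int]]:
--     (x1, y1), (x2, y2) = point_1, point_2
--     if x1 != x2 and y1 != y2:
--         return None  # diagonal segment: not handled, like A
--     # walk from the lexicographically smaller endpoint to the larger one
--     cur = (min(x1, x2), min(y1, y2))
--     end = (max(x1, x2), max(y1, y2))
--     step = (1 if cur[0] < end[0] else 0, 1 if cur[1] < end[1] else 0)
--     points = [cur]
--     while cur != end:
--         cur = (cur[0] + step[0], cur[1] + step[1])
--         points.append(cur)
--     return points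
-- ===== Notes on version B (the rewrite author's own statement) =====
-- stated objective: alternative
-- what changed: Replaces the two axis-specific range comprehensions with a vector walk: pick the smaller endpoint, compute a unit step vector, and iteratively step and append points until the other endpoint is reached.
import Mathlib
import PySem

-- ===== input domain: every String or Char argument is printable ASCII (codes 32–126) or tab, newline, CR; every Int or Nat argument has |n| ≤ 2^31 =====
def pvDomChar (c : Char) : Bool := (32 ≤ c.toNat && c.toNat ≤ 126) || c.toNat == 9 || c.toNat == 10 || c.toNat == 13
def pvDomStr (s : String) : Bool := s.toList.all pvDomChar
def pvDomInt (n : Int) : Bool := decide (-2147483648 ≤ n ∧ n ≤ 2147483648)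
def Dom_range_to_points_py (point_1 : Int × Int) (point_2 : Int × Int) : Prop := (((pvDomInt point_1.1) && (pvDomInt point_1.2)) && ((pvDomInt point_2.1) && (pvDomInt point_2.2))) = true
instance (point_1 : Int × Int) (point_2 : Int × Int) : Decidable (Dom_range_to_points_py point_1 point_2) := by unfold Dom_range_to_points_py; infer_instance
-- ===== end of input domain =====

-- B replaces A's two axis-specific range comprehensions with a unit-step vector walk
-- from the smaller endpoint to the larger one (objective: alternative decomposition).


-- ===== PORT A =====
-- literal transliteration of A: two axis-specific branches, implicit None otherwise
def range_to_points_py (point_1 : Int × Int) (point_2 : Int × Int) : Option (List (Int × Int)) :=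
  if point_1.1 == point_2.1 then
    some ((PySem.List.pyRange (min point_1.2 point_2.2) (max point_1.2 point_2.2 + 1) 1).map
      (fun i => (point_1.1, i)))
  else if point_1.2 == point_2.2 then
    some ((PySem.List.pyRange (min point_1.1 point_2.1) (max point_1.1 point_2.1 + 1) 1).map
      (fun i => (i, point_1.2)))
  else
    none

-- ===== PORT B =====
-- B's while-loop: step and append until `end` is reached; the loop runs exactly
-- (e.1 - s.1) + (e.2 - s.2) times (one axis is constant), used here as the Nat measure.
def pvWalk (cur : Int × Int) (step : Int × Int) : Nat → List (Int × Int)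
  | 0 => [cur]
  | Nat.succ n => cur :: pvWalk (cur.1 + step.1, cur.2 + step.2) step n

-- B: vector walk from the smaller endpoint with a unit step vector (Source B)
def range_to_points_py_alt (point_1 : Int × Int) (point_2 : Int × Int) : Option (List (Int × Int)) :=
  if point_1.1 ≠ point_2.1 ∧ point_1.2 ≠ point_2.2 then
    none
  else
    let s : Int × Int := (min point_1.1 point_2.1, min point_1.2 point_2.2)
    let e : Int × Int := (max point_1.1 point_2.1, max point_1.2 point_2.2)
    let step : Int × Int := ((if s.1 < e.1 then 1 else 0), (if s.2 < e.2 then 1 else 0))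
    some (pvWalk s step ((e.1 - s.1) + (e.2 - s.2)).toNat)

-- ===== PRECONDITION & SPEC =====
def Spec_range_to_points_py (point_1 : Int × Int) (point_2 : Int × Int) (out : Option (List (Int × Int))) : Prop := out = range_to_points_py_alt point_1 point_2
instance (point_1 : Int × Int) (point_2 : Int × Int) (out : Option (List (Int × Int))) : Decidable (Spec_range_to_points_py point_1 point_2 out) := by unfold Spec_range_to_points_py; infer_instance

-- ===== CLAIM (what is proved, stated in full; the proofs are below) =====
def Claim_equal_range_to_points_py : Prop := ∀ (point_1 : Int × Int) (point_2 : Int × Int), Dom_range_to_points_py point_1 point_2 → Spec_range_to_points_py point_1 point_2 (range_to_points_py point_1 point_2)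

-- ===== LEMMAS AND PROOFS =====

-- a vertical walk of n steps is the vertical range comprehension
theorem pvWalk_vert (n : Nat) : ∀ (x y : Int),
    pvWalk (x, y) (0, 1) n = (PySem.List.pyRange y (y + n + 1) 1).map (fun i => (x, i)) := by
  induction n with
  | zero =>
    intro x y
    rw [PySem.List.pyRange_one_cons (by omega)]
    simp [pvWalk]
  | succ n ih =>
    intro x y
    rw [PySem.List.pyRange_one_cons (by omega)]
    simp only [pvWalk, List.map_cons, List.cons.injEq, true_and, add_zero]
    rw [ih x (y + 1)]
    have h2 : y + 1 + (n : Int) + 1 = y + ((n : Int) + 1) + 1 := by ring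
    push_cast
    rw [h2]

-- a horizontal walk of n steps is the horizontal range comprehension
theorem pvWalk_horiz (n : Nat) : ∀ (x y : Int),
    pvWalk (x, y) (1, 0) n = (PySem.List.pyRange x (x + n + 1) 1).map (fun i => (i, y)) := by
  induction n with
  | zero =>
    intro x y
    rw [PySem.List.pyRange_one_cons (by omega)]
    simp [pvWalk]
  | succ n ih =>
    intro x y
    rw [PySem.List.pyRange_one_cons (by omega)]
    simp only [pvWalk, List.map_cons, List.cons.injEq, true_and, add_zero]
    rw [ih (x + 1) y]
    have h2 : x + 1 + (n : Int) + 1 = x + ((n : Int) + 1) + 1 := by ring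
    push_cast
    rw [h2]

-- ===== VERDICT (by name: the statement is the Claim_ definition above) =====
theorem range_to_points_py_spec : Claim_equal_range_to_points_py := by
  intro p1 p2 _
  obtain ⟨x1, y1⟩ := p1
  obtain ⟨x2, y2⟩ := p2
  unfold Spec_range_to_points_py range_to_points_py range_to_points_py_alt
  by_cases hx : x1 = x2
  · subst hx
    simp only [beq_self_eq_true, if_true, ne_eq, not_true_eq_false, false_and, if_false,
      min_self, max_self, lt_self_iff_false, if_false]
    by_cases hy : y1 = y2
    · subst hy
      simp [pvWalk, PySem.List.pyRange_one]
    · have hlt : min y1 y2 < max y1 y2 := by omega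
      simp only [hlt, if_true]
      have hfu : (x1 - x1 + (max y1 y2 - min y1 y2)).toNat = (max y1 y2 - min y1 y2).toNat := by
        omega
      have h3 : min y1 y2 + ((max y1 y2 - min y1 y2).toNat : Int) + 1 = max y1 y2 + 1 := by
        omega
      rw [hfu, pvWalk_vert ((max y1 y2 - min y1 y2).toNat) x1 (min y1 y2), h3]
  · by_cases hy : y1 = y2
    · subst hy
      have hne : (x1 == x2) = false := by simpa using hx
      simp only [hne, beq_self_eq_true, if_true, if_false, ne_eq, not_true_eq_false, and_false,
        min_self, max_self, lt_self_iff_false, if_false]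
      have hlt : min x1 x2 < max x1 x2 := by omega
      simp only [hlt, if_true, Bool.false_eq_true, if_false]
      have hfu : (max x1 x2 - min x1 x2 + (y1 - y1)).toNat = (max x1 x2 - min x1 x2).toNat := by
        omega
      have h3 : min x1 x2 + ((max x1 x2 - min x1 x2).toNat : Int) + 1 = max x1 x2 + 1 := by
        omega
      rw [hfu, pvWalk_horiz ((max x1 x2 - min x1 x2).toNat) (min x1 x2) y1, h3]
    · have hnx : (x1 == x2) = false := by simpa using hx
      have hny : (y1 == y2) = false := by simpa using hy
      simp [hnx, hny, hx, hy]
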